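-- pv_equiv track=rewrite | github.com/pnkvenemy/TFL | lab3/src/pumping.py | check_combined_pumping
-- ===== SOURCE A (Python) =====
-- import itertools
--
-- def check_combined_pumping(L, pumpings_P, pumpings_S, P_prime):
--     max_iterations = 3
--
--     for k1, k2 in itertools.product(range(1, max_iterations + 1), repeat=2):
--         for (u_P, v_P), (u_S, v_S) in itertools.product(pumpings_P, pumpings_S):
--             for i in range(1, k1 + 1):
--                 for j in range(1, k2 + 1):
--                     potential_word = u_P + (v_P * i) + u_S + (v_S * j)
--                     if potential_word in L:
--                         return True
--     return False
-- ===== SOURCE B (Python) =====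
-- def check_combined_pumping(L, pumpings_P, pumpings_S, P_prime):
--     # Meet-in-the-middle: precompute the sets of all pumped prefixes u_P+v_P*i
--     # and pumped suffixes u_S+v_S*j (i, j in 1..3) once, then scan each word
--     # of L over its split points instead of enumerating every combination.
--     prefixes = {u + v * i for (u, v) in pumpings_P for i in (1, 2, 3)}
--     suffixes = {u + v * j for (u, v) in pumpings_S for j in (1, 2, 3)}
--     for w in L:
--         for k in range(len(w) + 1):
--             if w[:k] in prefixes and w[k:] in suffixes:
--                 return True
--     return False
-- ===== Notes on version B (the rewrite author's own statement) =====
-- stated objective: faster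
-- what changed: Replaced A's generate-and-test (enumerate every combination u_P+v_P*i+u_S+v_S*j under a redundant (k1,k2) product and scan the list L for each candidate) by a meet-in-the-middle algorithm: build the hash sets of pumped prefixes {u_P+v_P*i} and pumped suffixes {u_S+v_S*j} once, then scan each word of L over its split points testing the two halves against the sets.
import Mathlib
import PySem

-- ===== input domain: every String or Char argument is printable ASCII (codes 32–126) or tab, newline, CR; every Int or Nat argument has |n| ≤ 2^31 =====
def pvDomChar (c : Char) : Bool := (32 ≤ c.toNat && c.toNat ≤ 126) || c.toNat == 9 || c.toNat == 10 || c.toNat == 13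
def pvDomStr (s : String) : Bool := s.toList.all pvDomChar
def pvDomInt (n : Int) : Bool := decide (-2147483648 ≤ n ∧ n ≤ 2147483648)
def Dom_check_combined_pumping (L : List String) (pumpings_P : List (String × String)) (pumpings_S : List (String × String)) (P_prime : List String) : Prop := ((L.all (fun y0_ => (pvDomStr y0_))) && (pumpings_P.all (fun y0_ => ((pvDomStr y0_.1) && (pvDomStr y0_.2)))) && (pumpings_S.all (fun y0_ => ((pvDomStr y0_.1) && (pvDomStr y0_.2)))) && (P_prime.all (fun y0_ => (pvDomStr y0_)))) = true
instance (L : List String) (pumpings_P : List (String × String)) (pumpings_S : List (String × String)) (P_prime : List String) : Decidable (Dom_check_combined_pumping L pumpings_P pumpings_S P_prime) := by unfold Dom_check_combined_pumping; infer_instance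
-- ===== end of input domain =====

-- B replaces A's generate-and-test enumeration by a meet-in-the-middle scan (prefix/suffix sets built once, each word of L split at every point); a timing run measured it faster.


-- ===== PORT A =====
-- u + v * n as a string (string repetition via PySem.List.pyRepeat on char lists)
def pvPump (u v : String) (n : Int) : String :=
  String.ofList (u.toList ++ PySem.List.pyRepeat v.toList n)

-- port of A: product over (k1,k2), then product over (pumpings_P, pumpings_S), then i in 1..k1, j in 1..k2
def check_combined_pumping (L : List String) (pumpings_P : List (String × String)) (pumpings_S : List (String × String)) (P_prime : List String) : Bool :=
  let max_iterations : Int := 3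
  ((PySem.List.pyRange 1 (max_iterations + 1) 1).flatMap (fun k1 =>
      (PySem.List.pyRange 1 (max_iterations + 1) 1).map (fun k2 => (k1, k2)))).any (fun kk =>
    (pumpings_P.flatMap (fun p => pumpings_S.map (fun s => (p, s)))).any (fun ps =>
      (PySem.List.pyRange 1 (kk.1 + 1) 1).any (fun i =>
        (PySem.List.pyRange 1 (kk.2 + 1) 1).any (fun j =>
          L.contains (String.ofList ((pvPump ps.1.1 ps.1.2 i).toList ++ (pvPump ps.2.1 ps.2.2 j).toList))))))

-- ===== PORT B =====
-- port of B: prefix/suffix sets built once, then each word of L is split at every point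
-- (w[:k] / w[k:] with 0 ≤ k ≤ len(w), so List.take/drop on k : Nat is exact)
def check_combined_pumping_alt (L : List String) (pumpings_P : List (String × String)) (pumpings_S : List (String × String)) (P_prime : List String) : Bool :=
  let prefixes : PySem.Set String :=
    PySem.Set.ofList (pumpings_P.flatMap (fun p => ([1, 2, 3] : List Int).map (fun i => pvPump p.1 p.2 i)))
  let suffixes : PySem.Set String :=
    PySem.Set.ofList (pumpings_S.flatMap (fun s => ([1, 2, 3] : List Int).map (fun j => pvPump s.1 s.2 j)))
  L.any (fun w =>
    (List.range (w.toList.length + 1)).any (fun k =>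
      PySem.Set.contains prefixes (String.ofList (w.toList.take k)) &&
      PySem.Set.contains suffixes (String.ofList (w.toList.drop k))))

-- ===== PRECONDITION & SPEC =====
def Spec_check_combined_pumping (L : List String) (pumpings_P : List (String × String)) (pumpings_S : List (String × String)) (P_prime : List String) (out : Bool) : Prop := out = check_combined_pumping_alt L pumpings_P pumpings_S P_prime
instance (L : List String) (pumpings_P : List (String × String)) (pumpings_S : List (String × String)) (P_prime : List String) (out : Bool) : Decidable (Spec_check_combined_pumping L pumpings_P pumpings_S P_prime out) := by unfold Spec_check_combined_pumping; infer_instance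

-- ===== CLAIM =====
def Claim_equal_check_combined_pumping : Prop := ∀ (L : List String) (pumpings_P : List (String × String)) (pumpings_S : List (String × String)) (P_prime : List String), Dom_check_combined_pumping L pumpings_P pumpings_S P_prime → Spec_check_combined_pumping L pumpings_P pumpings_S P_prime (check_combined_pumping L pumpings_P pumpings_S P_prime)

-- ===== LEMMAS AND PROOFS =====

-- A true ⟺ some pumped prefix/suffix concatenation is a word of L ⟺ B true (split at the prefix boundary).
theorem check_combined_pumping_eq_alt (L : List String) (pumpings_P : List (String × String))
    (pumpings_S : List (String × String)) (P_prime : List String) :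
    check_combined_pumping L pumpings_P pumpings_S P_prime
      = check_combined_pumping_alt L pumpings_P pumpings_S P_prime := by
  rw [Bool.eq_iff_iff]
  simp only [check_combined_pumping, check_combined_pumping_alt, PySem.Set.contains,
    List.any_eq_true, List.mem_flatMap, List.mem_map, PySem.List.mem_pyRange_one,
    List.contains_eq_mem, decide_eq_true_eq, Bool.and_eq_true,
    PySem.Set.mem_ofList, List.mem_range]
  constructor
  · rintro ⟨kk, ⟨k1, hk1, k2, hk2, rfl⟩, ps, ⟨p, hp, s, hs, rfl⟩, i, hi, j, hj, hw⟩
    refine ⟨_, hw, (pvPump p.1 p.2 i).toList.length, ?_, ?_, ?_⟩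
    · simp
    · refine ⟨p, hp, ?_⟩
      exact ⟨i, by simp; omega, by simp⟩
    · refine ⟨s, hs, ?_⟩
      exact ⟨j, by simp; omega, by simp⟩
  · rintro ⟨w, hw, k, hk, ⟨p, hp, hpre⟩, ⟨s, hs, hsuf⟩⟩
    obtain ⟨i, hi, hpre⟩ := hpre
    obtain ⟨j, hj, hsuf⟩ := hsuf
    simp only [List.mem_cons, List.not_mem_nil, or_false] at hi hj
    have hi' : 1 ≤ i ∧ i ≤ 3 := by rcases hi with h | h | h <;> omega
    have hj' : 1 ≤ j ∧ j ≤ 3 := by rcases hj with h | h | h <;> omega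
    refine ⟨(3, 3), ⟨3, by omega, 3, by omega, rfl⟩, (p, s), ⟨p, hp, s, hs, rfl⟩,
      i, by omega, j, by omega, ?_⟩
    have htake : (pvPump p.1 p.2 i).toList = w.toList.take k := by
      rw [hpre]; simp
    have hdrop : (pvPump s.1 s.2 j).toList = w.toList.drop k := by
      rw [hsuf]; simp
    have : String.ofList ((pvPump p.1 p.2 i).toList ++ (pvPump s.1 s.2 j).toList) = w := by
      rw [htake, hdrop, List.take_append_drop]; simp
    rwa [this]

-- ===== VERDICT =====
theorem check_combined_pumping_spec : Claim_equal_check_combined_pumping := by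
  intro L pumpings_P pumpings_S P_prime _
  exact check_combined_pumping_eq_alt L pumpings_P pumpings_S P_prime
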